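-- pv_equiv track=rewrite | github.com/mertnesvat/BreathAnalysis | analysis/plot_extended_sessions.py | find_peaks_with_prom
-- ===== SOURCE A (Python) =====
-- def find_peaks_with_prom(signal, min_distance=10, prominence_threshold=0.0):
--     peaks, proms = [], []
--     n = len(signal)
--     for i in range(1, n - 1):
--         if signal[i] > signal[i - 1] and signal[i] > signal[i + 1]:
--             left_min = min(signal[max(0, i - min_distance):i])
--             right_min = min(signal[i + 1:min(n, i + min_distance + 1)])
--             prominence = signal[i] - max(left_min, right_min)
--             if prominence >= prominence_threshold:
--                 peaks.append(i)
--                 proms.append(prominence)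
--     if len(peaks) < 2:
--         return peaks, proms
--     filtered_p, filtered_pr = [peaks[0]], [proms[0]]
--     for j in range(1, len(peaks)):
--         if peaks[j] - filtered_p[-1] >= min_distance:
--             filtered_p.append(peaks[j])
--             filtered_pr.append(proms[j])
--         elif proms[j] > filtered_pr[-1]:
--             filtered_p[-1] = peaks[j]
--             filtered_pr[-1] = proms[j]
--     return filtered_p, filtered_pr
-- ===== SOURCE B (Python) =====
-- # One O(n) pass: two amortized-O(1) sliding-minimum queues (pair of stacks with
-- # cached minima) replace A's per-peak window rescans, and the distance filter is
-- # fused into the same pass instead of a second phase.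
--
-- def _spush(st, v):
--     st.append((v, v if not st else min(v, st[-1][1])))
--
-- def _qpop(front, back):
--     if not front:
--         while back:
--             _spush(front, back.pop()[0])
--     front.pop()
--
-- def _qmin(front, back):
--     if front and back:
--         return min(front[-1][1], back[-1][1])
--     if front:
--         return front[-1][1]
--     return back[-1][1]
--
-- def find_peaks_with_prom(sig, min_distance=10, prominence_threshold=0.0):
--     # ('sig' = A's 'signal' parameter; the bare name 'signal' is disallowed for a rewrite module)
--     n = len(sig)
--     fp, fpr = [], []
--     lf, lb = [], []          # left queue  -> sig[max(0, i-min_distance) : i]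
--     rf, rb = [], []          # right queue -> sig[i+1 : min(n, i+min_distance+1)]
--     lstart = lend = 0
--     rstart = rend = 1
--     for i in range(1, n - 1):
--         _spush(lb, sig[i - 1]); lend = i
--         t = min(max(0, i - min_distance), lend)
--         while lstart < t:
--             _qpop(lf, lb); lstart += 1
--         t = min(n, i + min_distance + 1)
--         while rend < t:
--             _spush(rb, sig[rend]); rend += 1
--         t = min(rend, i + 1)
--         while rstart < t:
--             _qpop(rf, rb); rstart += 1
--         if sig[i] > sig[i - 1] and sig[i] > sig[i + 1]:
--             prominence = sig[i] - max(_qmin(lf, lb), _qmin(rf, rb))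
--             if prominence >= prominence_threshold:
--                 if fp and i - fp[-1] < min_distance:
--                     if prominence > fpr[-1]:
--                         fp[-1] = i
--                         fpr[-1] = prominence
--                 else:
--                     fp.append(i)
--                     fpr.append(prominence)
--     return fp, fpr
-- ===== Notes on version B (the rewrite author's own statement) =====
-- stated objective: faster
-- what changed: Replaces A's per-peak rescans of the left/right windows (min over a slice for every local maximum) by two amortized-O(1) sliding-minimum queues (pair of min-stacks) maintained in a single pass, and fuses A's second distance-filter loop into that same pass.
import Mathlib
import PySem

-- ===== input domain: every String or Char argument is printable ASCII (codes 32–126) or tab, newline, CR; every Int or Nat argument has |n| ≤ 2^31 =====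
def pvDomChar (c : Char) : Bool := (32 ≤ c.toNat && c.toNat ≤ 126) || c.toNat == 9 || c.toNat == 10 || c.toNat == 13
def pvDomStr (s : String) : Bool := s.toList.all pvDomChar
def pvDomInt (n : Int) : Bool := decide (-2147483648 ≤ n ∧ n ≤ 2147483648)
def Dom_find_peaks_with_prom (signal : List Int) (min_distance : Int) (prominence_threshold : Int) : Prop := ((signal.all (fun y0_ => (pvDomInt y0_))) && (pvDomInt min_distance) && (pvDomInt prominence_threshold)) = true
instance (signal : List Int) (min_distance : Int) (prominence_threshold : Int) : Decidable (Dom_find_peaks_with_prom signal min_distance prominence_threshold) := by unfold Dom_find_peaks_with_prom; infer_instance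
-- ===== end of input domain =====

-- B replaces A's per-peak window rescans by two amortized-O(1) sliding-minimum queues and
-- fuses the distance filter into the same single pass (O(n) instead of O(n·min_distance)).

-- ===== PORT A =====
-- first loop body of A (collect local maxima whose prominence passes the threshold)
def astep (signal : List Int) (n min_distance prominence_threshold : Int)
    (pp : List Int × List Int) (i : Int) : List Int × List Int :=
  if PySem.List.pyGetD signal i 0 > PySem.List.pyGetD signal (i-1) 0 ∧
     PySem.List.pyGetD signal i 0 > PySem.List.pyGetD signal (i+1) 0 then
    let left_min := (PySem.List.min? (PySem.List.slice signal (some (max 0 (i - min_distance))) (some i)) (fun x => x)).getD 0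
    let right_min := (PySem.List.min? (PySem.List.slice signal (some (i+1)) (some (min n (i + min_distance + 1)))) (fun x => x)).getD 0
    let prominence := PySem.List.pyGetD signal i 0 - max left_min right_min
    if prominence ≥ prominence_threshold then (pp.1 ++ [i], pp.2 ++ [prominence]) else pp
  else pp

-- second loop body of A (min-distance filter over the collected peaks)
def astep2 (min_distance : Int) (st : List Int × List Int) (pq : Int × Int) : List Int × List Int :=
  if pq.1 - PySem.List.pyGetD st.1 (-1) 0 ≥ min_distance then (st.1 ++ [pq.1], st.2 ++ [pq.2])
  else if pq.2 > PySem.List.pyGetD st.2 (-1) 0 then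
    (st.1.dropLast ++ [pq.1], st.2.dropLast ++ [pq.2])
  else st

def find_peaks_with_prom (signal : List Int) (min_distance : Int) (prominence_threshold : Int) : List Int × List Int :=
  let n : Int := signal.length
  let pp := (PySem.List.pyRange 1 (n - 1) 1).foldl (astep signal n min_distance prominence_threshold) ([], [])
  if pp.1.length < 2 then pp
  else
    match pp.1, pp.2 with
    | p0 :: prest, q0 :: qrest => (prest.zip qrest).foldl (astep2 min_distance) ([p0], [q0])
    | _, _ => pp

-- ===== PORT B =====
-- min-stack push (_spush in Source B); Python appends at the list's end, here the head is the top
def spush (st : List (Int × Int)) (v : Int) : List (Int × Int) :=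
  match st with
  | [] => [(v, v)]
  | (_, m) :: _ => (v, min v m) :: st

-- queue pop (_qpop in Source B): refill the front stack from the back stack if needed, drop the front top
def qpop : List (Int × Int) × List (Int × Int) → List (Int × Int) × List (Int × Int)
  | (f, b) =>
    match f with
    | [] => ((b.foldl (fun st p => spush st p.1) []).tail, [])
    | _ :: f' => (f', b)

-- a 'while' of k pops
def qpopN (q : List (Int × Int) × List (Int × Int)) : Nat → List (Int × Int) × List (Int × Int)
  | 0 => q
  | k+1 => qpopN (qpop q) k

-- _qmin in Source B; Python raises IndexError on an empty queue, the 0 default is unreachable under Pre_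
def qmin (f b : List (Int × Int)) : Int :=
  match f, b with
  | (_, m1) :: _, (_, m2) :: _ => min m1 m2
  | (_, m1) :: _, [] => m1
  | [], (_, m2) :: _ => m2
  | [], [] => 0

-- streaming min-distance filter update (the inner `if fp and …` block of Source B)
def fstep (min_distance : Int) (st : List Int × List Int) (pq : Int × Int) : List Int × List Int :=
  if st.1 ≠ [] ∧ pq.1 - PySem.List.pyGetD st.1 (-1) 0 < min_distance then
    if pq.2 > PySem.List.pyGetD st.2 (-1) 0 then
      (st.1.dropLast ++ [pq.1], st.2.dropLast ++ [pq.2])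
    else st
  else (st.1 ++ [pq.1], st.2 ++ [pq.2])

-- the per-index loop state of Source B
structure BSt where
  fp : List Int
  fpr : List Int
  lf : List (Int × Int)
  lb : List (Int × Int)
  rf : List (Int × Int)
  rb : List (Int × Int)
  lstart : Int
  rstart : Int
  rend : Int
deriving Repr, DecidableEq

-- one iteration of Source B's single loop
def bstep (signal : List Int) (n min_distance prominence_threshold : Int) (s : BSt) (i : Int) : BSt :=
  let lb1 := spush s.lb (PySem.List.pyGetD signal (i-1) 0)
  let lt := min (max 0 (i - min_distance)) i
  let lq := qpopN (s.lf, lb1) (lt - s.lstart).toNat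
  let lstart' := max s.lstart lt
  let rt := min n (i + min_distance + 1)
  let rb1 := (PySem.List.pyRange s.rend rt 1).foldl (fun st j => spush st (PySem.List.pyGetD signal j 0)) s.rb
  let rend' := max s.rend rt
  let rt2 := min rend' (i + 1)
  let rq := qpopN (s.rf, rb1) (rt2 - s.rstart).toNat
  let rstart' := max s.rstart rt2
  if PySem.List.pyGetD signal i 0 > PySem.List.pyGetD signal (i-1) 0 ∧
     PySem.List.pyGetD signal i 0 > PySem.List.pyGetD signal (i+1) 0 then
    let prominence := PySem.List.pyGetD signal i 0 - max (qmin lq.1 lq.2) (qmin rq.1 rq.2)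
    if prominence ≥ prominence_threshold then
      let fpp := fstep min_distance (s.fp, s.fpr) (i, prominence)
      ⟨fpp.1, fpp.2, lq.1, lq.2, rq.1, rq.2, lstart', rstart', rend'⟩
    else ⟨s.fp, s.fpr, lq.1, lq.2, rq.1, rq.2, lstart', rstart', rend'⟩
  else ⟨s.fp, s.fpr, lq.1, lq.2, rq.1, rq.2, lstart', rstart', rend'⟩

def find_peaks_with_prom_alt (signal : List Int) (min_distance : Int) (prominence_threshold : Int) : List Int × List Int :=
  let n : Int := signal.length
  let fin := (PySem.List.pyRange 1 (n - 1) 1).foldl (bstep signal n min_distance prominence_threshold)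
    ⟨[], [], [], [], [], [], 0, 1, 1⟩
  (fin.fp, fin.fpr)

-- ===== PRECONDITION & SPEC =====
-- Pre_ excludes exactly the inputs where A raises (ValueError: min of an empty slice):
-- min_distance ≤ 0 together with at least one strict local maximum in the signal.
def Pre_find_peaks_with_prom (signal : List Int) (min_distance : Int) (prominence_threshold : Int) : Prop :=
  1 ≤ min_distance ∨
    ∀ i ∈ PySem.List.pyRange 1 ((signal.length : Int) - 1) 1,
      ¬(PySem.List.pyGetD signal i 0 > PySem.List.pyGetD signal (i-1) 0 ∧
        PySem.List.pyGetD signal i 0 > PySem.List.pyGetD signal (i+1) 0)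
instance (signal : List Int) (min_distance : Int) (prominence_threshold : Int) : Decidable (Pre_find_peaks_with_prom signal min_distance prominence_threshold) := by unfold Pre_find_peaks_with_prom; infer_instance

def pvWitness_find_peaks_with_prom : List Int × Int × Int := ([0, 3, 1, 0, 2, 0], 2, 1)

def Spec_find_peaks_with_prom (signal : List Int) (min_distance : Int) (prominence_threshold : Int) (out : List Int × List Int) : Prop := out = find_peaks_with_prom_alt signal min_distance prominence_threshold
instance (signal : List Int) (min_distance : Int) (prominence_threshold : Int) (out : List Int × List Int) : Decidable (Spec_find_peaks_with_prom signal min_distance prominence_threshold out) := by unfold Spec_find_peaks_with_prom; infer_instance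

-- ===== CLAIM (what is proved, stated in full; the proofs are below) =====
def Claim_equal_find_peaks_with_prom : Prop := ∀ (signal : List Int) (min_distance : Int) (prominence_threshold : Int), Dom_find_peaks_with_prom signal min_distance prominence_threshold → Pre_find_peaks_with_prom signal min_distance prominence_threshold → Spec_find_peaks_with_prom signal min_distance prominence_threshold (find_peaks_with_prom signal min_distance prominence_threshold)

-- ===== LEMMAS AND PROOFS =====

/- A's per-peak window minima, named for the proofs -/
def lminv (signal : List Int) (md i : Int) : Int :=
  (PySem.List.min? (PySem.List.slice signal (some (max 0 (i - md))) (some i)) (fun x => x)).getD 0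
def rminv (signal : List Int) (n md i : Int) : Int :=
  (PySem.List.min? (PySem.List.slice signal (some (i+1)) (some (min n (i + md + 1)))) (fun x => x)).getD 0
def promv (signal : List Int) (n md i : Int) : Int :=
  PySem.List.pyGetD signal i 0 - max (lminv signal md i) (rminv signal n md i)

/- the (index, prominence) pairs A's first loop emits at index i (0 or 1 of them) -/
def cand (signal : List Int) (n md thr i : Int) : List (Int × Int) :=
  if PySem.List.pyGetD signal i 0 > PySem.List.pyGetD signal (i-1) 0 ∧
     PySem.List.pyGetD signal i 0 > PySem.List.pyGetD signal (i+1) 0 then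
    if promv signal n md i ≥ thr then [(i, promv signal n md i)] else []
  else []

def cands (signal : List Int) (n md thr b : Int) : List (Int × Int) :=
  (PySem.List.pyRange 1 b 1).flatMap (cand signal n md thr)

lemma astep_eq (signal : List Int) (n md thr : Int) (pp : List Int × List Int) (i : Int) :
    astep signal n md thr pp i =
      (pp.1 ++ (cand signal n md thr i).map Prod.fst,
       pp.2 ++ (cand signal n md thr i).map Prod.snd) := by
  simp only [astep, cand, promv, lminv, rminv]
  split_ifs <;> simp

lemma foldl_astep (signal : List Int) (n md thr : Int) (l : List Int) :
    ∀ pp : List Int × List Int,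
      l.foldl (astep signal n md thr) pp =
        (pp.1 ++ (l.flatMap (cand signal n md thr)).map Prod.fst,
         pp.2 ++ (l.flatMap (cand signal n md thr)).map Prod.snd) := by
  induction l with
  | nil => intro pp; simp
  | cons x t ih => intro pp; simp [astep_eq, ih]

/- ---- min-stack facts ---- -/

def SInv : List (Int × Int) → Prop
  | [] => True
  | (v, m) :: st => m = (st.map Prod.fst).foldl min v ∧ SInv st

lemma spush_fst (st : List (Int × Int)) (v : Int) :
    (spush st v).map Prod.fst = v :: st.map Prod.fst := by
  cases st with
  | nil => rfl
  | cons h t => obtain ⟨w, m⟩ := h; rfl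

lemma spush_SInv {st : List (Int × Int)} {v : Int} (h : SInv st) : SInv (spush st v) := by
  cases st with
  | nil => exact ⟨by simp, trivial⟩
  | cons hd t =>
    obtain ⟨w, m⟩ := hd
    refine ⟨?_, h⟩
    show min v m = (((w, m) :: t).map Prod.fst).foldl min v
    simp only [List.map_cons, List.foldl_cons]
    rw [List.foldl_assoc, ← h.1]

lemma SInv_tail {st : List (Int × Int)} (h : SInv st) : SInv st.tail := by
  cases st with
  | nil => trivial
  | cons hd t => exact h.2

lemma refill_fst : ∀ (b acc : List (Int × Int)),
    ((b.foldl (fun st p => spush st p.1) acc).map Prod.fst) =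
      (b.map Prod.fst).reverse ++ acc.map Prod.fst := by
  intro b
  induction b with
  | nil => intro acc; simp
  | cons hd t ih => intro acc; simp [ih, spush_fst]

lemma refill_SInv : ∀ (b acc : List (Int × Int)), SInv acc →
    SInv (b.foldl (fun st p => spush st p.1) acc) := by
  intro b
  induction b with
  | nil => intro acc h; exact h
  | cons hd t ih => intro acc h; exact ih _ (spush_SInv h)

def qlist (f b : List (Int × Int)) : List Int := f.map Prod.fst ++ (b.map Prod.fst).reverse

lemma map_fst_tail (st : List (Int × Int)) : (st.tail).map Prod.fst = (st.map Prod.fst).tail := by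
  cases st <;> rfl

lemma qpop_qlist (f b : List (Int × Int)) :
    qlist (qpop (f, b)).1 (qpop (f, b)).2 = (qlist f b).tail := by
  cases f with
  | nil =>
    simp only [qpop, qlist]
    rw [map_fst_tail, refill_fst]
    simp
  | cons x f' => obtain ⟨v, m⟩ := x; simp [qpop, qlist]

lemma qpop_SInv {f b : List (Int × Int)} (hf : SInv f) (hb : SInv b) :
    SInv (qpop (f, b)).1 ∧ SInv (qpop (f, b)).2 := by
  cases f with
  | nil => exact ⟨SInv_tail (refill_SInv b [] trivial), trivial⟩
  | cons x f' => exact ⟨hf.2, hb⟩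

lemma qpopN_qlist : ∀ (k : Nat) (q : List (Int × Int) × List (Int × Int)),
    SInv q.1 → SInv q.2 →
      qlist (qpopN q k).1 (qpopN q k).2 = (qlist q.1 q.2).drop k ∧
      SInv (qpopN q k).1 ∧ SInv (qpopN q k).2 := by
  intro k
  induction k with
  | zero => intro q h1 h2; exact ⟨rfl, h1, h2⟩
  | succ k ih =>
    intro q h1 h2
    obtain ⟨f, b⟩ := q
    have hp := qpop_SInv h1 h2
    have key := ih ((qpop (f, b)).1, (qpop (f, b)).2) hp.1 hp.2
    have e1 : qpopN (f, b) (k+1) = qpopN ((qpop (f, b)).1, (qpop (f, b)).2) k := rfl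
    refine ⟨?_, e1 ▸ key.2⟩
    rw [e1, key.1]
    simp only []
    rw [qpop_qlist, ← List.drop_one, List.drop_drop, Nat.add_comm 1 k]

/- value of min? is permutation-invariant (identity key) -/
lemma min?_id_perm {l l' : List Int} (h : l.Perm l') :
    PySem.List.min? l (fun x => x) = PySem.List.min? l' (fun x => x) := by
  cases hl : PySem.List.min? l (fun x => x) with
  | none =>
    have he : l = [] := (PySem.List.min?_eq_none_iff _ _).1 hl
    subst he
    have he' : l' = [] := h.symm.eq_nil
    subst he'
    exact hl.symm
  | some m =>
    cases hl' : PySem.List.min? l' (fun x => x) with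
    | none =>
      have he' : l' = [] := (PySem.List.min?_eq_none_iff _ _).1 hl'
      subst he'
      have he : l = [] := h.eq_nil
      subst he
      rw [hl] at hl'
      exact hl'
    | some m' =>
      have hm := PySem.List.min?_mem hl
      have hm' := PySem.List.min?_mem hl'
      have h1 := PySem.List.min?_isMin hl
      have h2 := PySem.List.min?_isMin hl'
      have : m = m' := le_antisymm (h1 m' (h.symm.subset hm')) (h2 m (h.subset hm))
      simp [this]

lemma qmin_spec {f b : List (Int × Int)} (hf : SInv f) (hb : SInv b)
    (hne : qlist f b ≠ []) :
    some (qmin f b) = PySem.List.min? (qlist f b) (fun x => x) := by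
  have hperm : (qlist f b).Perm (f.map Prod.fst ++ b.map Prod.fst) := by
    unfold qlist
    exact (List.reverse_perm _).append_left _
  rw [min?_id_perm hperm]
  cases f with
  | nil =>
    cases b with
    | nil => simp [qlist] at hne
    | cons x t =>
      obtain ⟨v, m⟩ := x
      simp only [List.map_nil, List.nil_append, List.map_cons]
      rw [PySem.List.min?_id_cons]
      exact congrArg some hb.1
  | cons x t =>
    obtain ⟨v, m⟩ := x
    cases b with
    | nil =>
      simp only [List.map_cons, List.map_nil, List.append_nil]
      rw [PySem.List.min?_id_cons]
      exact congrArg some hf.1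
    | cons y u =>
      obtain ⟨w, m2⟩ := y
      simp only [List.map_cons, List.cons_append]
      rw [PySem.List.min?_id_cons]
      congr 1
      show min m m2 = _
      rw [List.foldl_append, ← hf.1, List.foldl_cons, List.foldl_assoc, ← hb.1]

/- ---- window (slice) facts ---- -/

def win (signal : List Int) (a b : Nat) : List Int := (signal.drop a).take (b - a)

lemma win_snoc {signal : List Int} {a b : Nat} (h1 : a ≤ b) (h2 : b < signal.length) :
    win signal a (b+1) = win signal a b ++ [signal[b]] := by
  unfold win
  rw [show b + 1 - a = (b - a) + 1 by omega, List.take_add_one]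
  congr 1
  rw [List.getElem?_drop, show a + (b - a) = b by omega, List.getElem?_eq_getElem h2]
  rfl

lemma win_drop (signal : List Int) (a b k : Nat) :
    (win signal a b).drop k = win signal (a+k) b := by
  unfold win
  rw [List.drop_take, List.drop_drop, show b - a - k = b - (a + k) by omega]

lemma win_append {signal : List Int} {a b c : Nat} (h1 : a ≤ b) (h2 : b ≤ c) :
    win signal a b ++ win signal b c = win signal a c := by
  unfold win
  rw [show c - a = (b - a) + (c - b) by omega, List.take_add]
  congr 2
  rw [List.drop_drop, show a + (b - a) = b by omega]

lemma win_ne_nil {signal : List Int} {a b : Nat} (h1 : a < b) (h2 : a < signal.length) :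
    win signal a b ≠ [] := by
  apply List.ne_nil_of_length_pos
  unfold win
  rw [List.length_take, List.length_drop]
  omega

lemma map_sget_pyRange (signal : List Int) :
    ∀ (k : Nat) (a b : Int), 0 ≤ a → b ≤ (signal.length : Int) → (b - a).toNat = k →
      (PySem.List.pyRange a b 1).map (fun j => PySem.List.pyGetD signal j 0) =
        win signal a.toNat b.toNat := by
  intro k
  induction k with
  | zero =>
    intro a b h0 hb hk
    rw [PySem.List.pyRange_one_eq_nil (by omega)]
    unfold win
    rw [show b.toNat - a.toNat = 0 by omega]
    simp
  | succ k ih =>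
    intro a b h0 hb hk
    have hab : a < b := by omega
    rw [PySem.List.pyRange_one_cons hab, List.map_cons, ih (a+1) b (by omega) hb (by omega)]
    have halen : a.toNat < signal.length := by omega
    rw [PySem.List.pyGetD_eq_getElem signal 0 h0 (by omega)]
    unfold win
    rw [List.drop_eq_getElem_cons halen, show b.toNat - a.toNat = (b.toNat - (a.toNat + 1)) + 1 by omega,
        List.take_succ_cons, show (a+1).toNat = a.toNat + 1 by omega]

/- ---- the two distance-filter loops compute the same thing ---- -/

lemma astep2_eq_fstep {md : Int} {st : List Int × List Int} {pq : Int × Int}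
    (h1 : st.1 ≠ []) : astep2 md st pq = fstep md st pq := by
  unfold astep2 fstep
  by_cases hc : pq.1 - PySem.List.pyGetD st.1 (-1) 0 ≥ md
  · rw [if_pos hc, if_neg (by intro h; omega)]
  · rw [if_neg hc]
    have hcc : st.1 ≠ [] ∧ pq.1 - PySem.List.pyGetD st.1 (-1) 0 < md := ⟨h1, by omega⟩
    rw [if_pos hcc]

lemma fstep_ne_nil {md : Int} {st : List Int × List Int} {pq : Int × Int}
    (h1 : st.1 ≠ []) (h2 : st.2 ≠ []) :
    (fstep md st pq).1 ≠ [] ∧ (fstep md st pq).2 ≠ [] := by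
  unfold fstep
  split_ifs <;> simp_all

lemma foldl_astep2_eq_fstep (md : Int) (l : List (Int × Int)) :
    ∀ st : List Int × List Int, st.1 ≠ [] → st.2 ≠ [] →
      l.foldl (astep2 md) st = l.foldl (fstep md) st := by
  induction l with
  | nil => intro st h1 h2; rfl
  | cons c t ih =>
    intro st h1 h2
    rw [List.foldl_cons, List.foldl_cons, astep2_eq_fstep h1]
    exact ih _ (fstep_ne_nil h1 h2).1 (fstep_ne_nil h1 h2).2

/- ---- the queue-maintenance part of bstep, named for the proofs ---- -/

def qup (signal : List Int) (n md : Int) (s : BSt) (i : Int) : BSt :=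
  let lb1 := spush s.lb (PySem.List.pyGetD signal (i-1) 0)
  let lt := min (max 0 (i - md)) i
  let lq := qpopN (s.lf, lb1) (lt - s.lstart).toNat
  let rt := min n (i + md + 1)
  let rb1 := (PySem.List.pyRange s.rend rt 1).foldl (fun st j => spush st (PySem.List.pyGetD signal j 0)) s.rb
  let rend' := max s.rend rt
  let rt2 := min rend' (i + 1)
  let rq := qpopN (s.rf, rb1) (rt2 - s.rstart).toNat
  ⟨s.fp, s.fpr, lq.1, lq.2, rq.1, rq.2, max s.lstart lt, max s.rstart rt2, rend'⟩

lemma bstep_eq (signal : List Int) (n md thr : Int) (s : BSt) (i : Int) :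
    bstep signal n md thr s i =
      (if PySem.List.pyGetD signal i 0 > PySem.List.pyGetD signal (i-1) 0 ∧
          PySem.List.pyGetD signal i 0 > PySem.List.pyGetD signal (i+1) 0 then
        (if PySem.List.pyGetD signal i 0 -
              max (qmin (qup signal n md s i).lf (qup signal n md s i).lb)
                  (qmin (qup signal n md s i).rf (qup signal n md s i).rb) ≥ thr then
          { qup signal n md s i with
              fp := (fstep md (s.fp, s.fpr)
                (i, PySem.List.pyGetD signal i 0 -
                    max (qmin (qup signal n md s i).lf (qup signal n md s i).lb)
                        (qmin (qup signal n md s i).rf (qup signal n md s i).rb))).1,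
              fpr := (fstep md (s.fp, s.fpr)
                (i, PySem.List.pyGetD signal i 0 -
                    max (qmin (qup signal n md s i).lf (qup signal n md s i).lb)
                        (qmin (qup signal n md s i).rf (qup signal n md s i).rb))).2 }
        else qup signal n md s i)
      else qup signal n md s i) := rfl

lemma qlist_spush (f b : List (Int × Int)) (v : Int) :
    qlist f (spush b v) = qlist f b ++ [v] := by
  unfold qlist
  rw [spush_fst]
  simp

lemma qlist_pushfold (signal : List Int) :
    ∀ (l : List Int) (f b : List (Int × Int)), SInv b →
      qlist f (l.foldl (fun st x => spush st (PySem.List.pyGetD signal x 0)) b) =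
        qlist f b ++ l.map (fun x => PySem.List.pyGetD signal x 0) ∧
      SInv (l.foldl (fun st x => spush st (PySem.List.pyGetD signal x 0)) b) := by
  intro l
  induction l with
  | nil => intro f b hb; exact ⟨by simp, hb⟩
  | cons x t ih =>
    intro f b hb
    have := ih f (spush b (PySem.List.pyGetD signal x 0)) (spush_SInv hb)
    refine ⟨?_, this.2⟩
    rw [List.foldl_cons, this.1, qlist_spush]
    simp

lemma qup_spec {signal : List Int} {n md j : Int} {s : BSt}
    (hn : n = signal.length) (hmd : 1 ≤ md) (hj : 0 ≤ j) (hjn : j + 1 ≤ n - 2)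
    (hlf : SInv s.lf) (hlb : SInv s.lb) (hrf : SInv s.rf) (hrb : SInv s.rb)
    (hls : s.lstart = max 0 (j - md)) (hrs : s.rstart = j + 1)
    (hre : s.rend = (if j = 0 then 1 else min n (j + md + 1)))
    (hql : qlist s.lf s.lb = win signal (max 0 (j - md)).toNat j.toNat)
    (hqr : qlist s.rf s.rb = win signal (j+1).toNat s.rend.toNat) :
    (qup signal n md s (j+1)).fp = s.fp ∧
    (qup signal n md s (j+1)).fpr = s.fpr ∧
    SInv (qup signal n md s (j+1)).lf ∧ SInv (qup signal n md s (j+1)).lb ∧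
    SInv (qup signal n md s (j+1)).rf ∧ SInv (qup signal n md s (j+1)).rb ∧
    (qup signal n md s (j+1)).lstart = max 0 ((j+1) - md) ∧
    (qup signal n md s (j+1)).rstart = (j+1) + 1 ∧
    (qup signal n md s (j+1)).rend = min n ((j+1) + md + 1) ∧
    qlist (qup signal n md s (j+1)).lf (qup signal n md s (j+1)).lb =
      win signal (max 0 ((j+1) - md)).toNat (j+1).toNat ∧
    qlist (qup signal n md s (j+1)).rf (qup signal n md s (j+1)).rb =
      win signal ((j+1) + 1).toNat (min n ((j+1) + md + 1)).toNat := by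
  have hlen : (signal.length : Int) = n := by rw [hn]
  have hj3 : j + 3 ≤ n := by omega
  obtain ⟨hb1, hb2, hb3, hb4⟩ :
      1 ≤ s.rend ∧ j + 1 ≤ s.rend ∧ s.rend ≤ min n ((j+1) + md + 1) ∧ s.rend ≤ n := by
    by_cases h0 : j = 0
    · rw [hre, if_pos h0]; omega
    · rw [hre, if_neg h0]; omega
  have hvl : PySem.List.pyGetD signal ((j+1)-1) 0 = signal[j.toNat]'(by omega) := by
    rw [show (j+1)-1 = j by ring]
    exact PySem.List.pyGetD_eq_getElem signal 0 hj (by omega)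
  have hql1 : qlist s.lf (spush s.lb (PySem.List.pyGetD signal ((j+1)-1) 0)) =
      win signal (max 0 (j - md)).toNat (j.toNat + 1) := by
    rw [qlist_spush, hql, hvl, win_snoc (by omega) (by omega)]
  have hpopL := qpopN_qlist ((min (max 0 ((j+1) - md)) (j+1) - s.lstart).toNat)
      (s.lf, spush s.lb (PySem.List.pyGetD signal ((j+1)-1) 0)) hlf (spush_SInv hlb)
  have hpushR := qlist_pushfold signal
      (PySem.List.pyRange s.rend (min n ((j+1) + md + 1)) 1) s.rf s.rb hrb
  have hmapR : (PySem.List.pyRange s.rend (min n ((j+1) + md + 1)) 1).map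
        (fun x => PySem.List.pyGetD signal x 0)
      = win signal s.rend.toNat (min n ((j+1) + md + 1)).toNat :=
    map_sget_pyRange signal _ s.rend (min n ((j+1) + md + 1)) (by omega) (by omega) rfl
  have hqr1 : qlist s.rf ((PySem.List.pyRange s.rend (min n ((j+1) + md + 1)) 1).foldl
        (fun st x => spush st (PySem.List.pyGetD signal x 0)) s.rb)
      = win signal (j+1).toNat (min n ((j+1) + md + 1)).toNat := by
    rw [hpushR.1, hmapR, hqr, win_append (by omega) (by omega)]
  have hpopR := qpopN_qlist
      ((min (max s.rend (min n ((j+1) + md + 1))) ((j+1)+1) - s.rstart).toNat)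
      (s.rf, (PySem.List.pyRange s.rend (min n ((j+1) + md + 1)) 1).foldl
        (fun st x => spush st (PySem.List.pyGetD signal x 0)) s.rb) hrf hpushR.2
  refine ⟨rfl, rfl, hpopL.2.1, hpopL.2.2, hpopR.2.1, hpopR.2.2, ?_, ?_, ?_, ?_, ?_⟩
  · show max s.lstart (min (max 0 ((j+1) - md)) (j+1)) = max 0 ((j+1) - md)
    rw [hls]; omega
  · show max s.rstart (min (max s.rend (min n ((j+1) + md + 1))) ((j+1)+1)) = (j+1) + 1
    rw [hrs]; omega
  · show max s.rend (min n ((j+1) + md + 1)) = min n ((j+1) + md + 1)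
    omega
  · rw [show (qup signal n md s (j+1)).lf
        = (qpopN (s.lf, spush s.lb (PySem.List.pyGetD signal ((j+1)-1) 0))
            ((min (max 0 ((j+1) - md)) (j+1) - s.lstart).toNat)).1 from rfl,
        show (qup signal n md s (j+1)).lb
        = (qpopN (s.lf, spush s.lb (PySem.List.pyGetD signal ((j+1)-1) 0))
            ((min (max 0 ((j+1) - md)) (j+1) - s.lstart).toNat)).2 from rfl,
        hpopL.1]
    show (qlist s.lf (spush s.lb (PySem.List.pyGetD signal ((j+1)-1) 0))).drop _ = _
    rw [hql1, win_drop,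
        show (max 0 (j - md)).toNat + (min (max 0 ((j+1) - md)) (j+1) - s.lstart).toNat
          = (max 0 ((j+1) - md)).toNat by rw [hls]; omega,
        show j.toNat + 1 = (j+1).toNat by omega]
  · rw [show (qup signal n md s (j+1)).rf
        = (qpopN (s.rf, (PySem.List.pyRange s.rend (min n ((j+1) + md + 1)) 1).foldl
            (fun st x => spush st (PySem.List.pyGetD signal x 0)) s.rb)
            ((min (max s.rend (min n ((j+1) + md + 1))) ((j+1)+1) - s.rstart).toNat)).1 from rfl,
        show (qup signal n md s (j+1)).rb
        = (qpopN (s.rf, (PySem.List.pyRange s.rend (min n ((j+1) + md + 1)) 1).foldl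
            (fun st x => spush st (PySem.List.pyGetD signal x 0)) s.rb)
            ((min (max s.rend (min n ((j+1) + md + 1))) ((j+1)+1) - s.rstart).toNat)).2 from rfl,
        hpopR.1]
    show (qlist s.rf ((PySem.List.pyRange s.rend (min n ((j+1) + md + 1)) 1).foldl
        (fun st x => spush st (PySem.List.pyGetD signal x 0)) s.rb)).drop _ = _
    rw [hqr1, win_drop,
        show (j+1).toNat + (min (max s.rend (min n ((j+1) + md + 1))) ((j+1)+1) - s.rstart).toNat
          = ((j+1) + 1).toNat by rw [hrs]; omega]

/- ---- the loop invariant of B's single pass (min_distance ≥ 1) ---- -/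

def BInv (signal : List Int) (n md thr : Int) (j : Int) (s : BSt) : Prop :=
  SInv s.lf ∧ SInv s.lb ∧ SInv s.rf ∧ SInv s.rb ∧
  s.lstart = max 0 (j - md) ∧
  s.rstart = j + 1 ∧
  s.rend = (if j = 0 then 1 else min n (j + md + 1)) ∧
  qlist s.lf s.lb = win signal (max 0 (j - md)).toNat j.toNat ∧
  qlist s.rf s.rb = win signal (j+1).toNat s.rend.toNat ∧
  (s.fp, s.fpr) = (cands signal n md thr (j+1)).foldl (fstep md) ([], [])

lemma bstep_inv {signal : List Int} {n md thr j : Int} {s : BSt}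
    (hn : n = signal.length) (hmd : 1 ≤ md) (hj : 0 ≤ j) (hjn : j + 1 ≤ n - 2)
    (hInv : BInv signal n md thr j s) :
    BInv signal n md thr (j+1) (bstep signal n md thr s (j+1)) := by
  obtain ⟨hlf, hlb, hrf, hrb, hls, hrs, hre, hql, hqr, hfp⟩ := hInv
  obtain ⟨hufp, hufpr, hulf, hulb, hurf, hurb, huls, hurs, hure, huql, huqr⟩ :=
    qup_spec hn hmd hj hjn hlf hlb hrf hrb hls hrs hre hql hqr
  have hlen : (signal.length : Int) = n := by rw [hn]
  have hcands : cands signal n md thr ((j+1)+1)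
      = cands signal n md thr (j+1) ++ cand signal n md thr (j+1) := by
    unfold cands
    rw [PySem.List.pyRange_one_succ_right (by omega), List.flatMap_append]
    simp
  have hneL : qlist (qup signal n md s (j+1)).lf (qup signal n md s (j+1)).lb ≠ [] := by
    rw [huql]
    exact win_ne_nil (by omega) (by omega)
  have hneR : qlist (qup signal n md s (j+1)).rf (qup signal n md s (j+1)).rb ≠ [] := by
    rw [huqr]
    exact win_ne_nil (by omega) (by omega)
  have hqminL : qmin (qup signal n md s (j+1)).lf (qup signal n md s (j+1)).lb
      = lminv signal md (j+1) := by
    have h := qmin_spec hulf hulb hneL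
    rw [huql] at h
    unfold lminv
    rw [PySem.List.slice_toNat signal (a := max 0 ((j+1) - md)) (b := j+1) (by omega) (by omega)]
    rw [show (signal.drop (max 0 ((j+1) - md)).toNat).take ((j+1).toNat - (max 0 ((j+1) - md)).toNat)
        = win signal (max 0 ((j+1) - md)).toNat (j+1).toNat from rfl, ← h]
    rfl
  have hqminR : qmin (qup signal n md s (j+1)).rf (qup signal n md s (j+1)).rb
      = rminv signal n md (j+1) := by
    have h := qmin_spec hurf hurb hneR
    rw [huqr] at h
    unfold rminv
    rw [PySem.List.slice_toNat signal (a := (j+1)+1) (b := min n ((j+1) + md + 1)) (by omega) (by omega)]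
    rw [show (signal.drop ((j+1) + 1).toNat).take ((min n ((j+1) + md + 1)).toNat - ((j+1) + 1).toNat)
        = win signal ((j+1) + 1).toNat (min n ((j+1) + md + 1)).toNat from rfl, ← h]
    rfl
  have hprom : PySem.List.pyGetD signal (j+1) 0 -
      max (qmin (qup signal n md s (j+1)).lf (qup signal n md s (j+1)).lb)
          (qmin (qup signal n md s (j+1)).rf (qup signal n md s (j+1)).rb)
      = promv signal n md (j+1) := by
    unfold promv
    rw [hqminL, hqminR]
  have hqupInv : ∀ t : BSt, t.lf = (qup signal n md s (j+1)).lf →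
      t.lb = (qup signal n md s (j+1)).lb → t.rf = (qup signal n md s (j+1)).rf →
      t.rb = (qup signal n md s (j+1)).rb → t.lstart = (qup signal n md s (j+1)).lstart →
      t.rstart = (qup signal n md s (j+1)).rstart → t.rend = (qup signal n md s (j+1)).rend →
      (t.fp, t.fpr) = (cands signal n md thr ((j+1)+1)).foldl (fstep md) ([], []) →
      BInv signal n md thr (j+1) t := by
    intro t e1 e2 e3 e4 e5 e6 e7 e8
    refine ⟨e1 ▸ hulf, e2 ▸ hulb, e3 ▸ hurf, e4 ▸ hurb, ?_, ?_, ?_, ?_, ?_, e8⟩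
    · rw [e5, huls]
    · rw [e6, hurs]
    · rw [e7, hure, if_neg (by omega)]
    · rw [e1, e2, huql]
    · rw [e3, e4, e7, hure, huqr]
  rw [bstep_eq]
  by_cases hpk : PySem.List.pyGetD signal (j+1) 0 > PySem.List.pyGetD signal ((j+1)-1) 0 ∧
      PySem.List.pyGetD signal (j+1) 0 > PySem.List.pyGetD signal ((j+1)+1) 0
  · rw [if_pos hpk, hprom]
    by_cases hth : promv signal n md (j+1) ≥ thr
    · rw [if_pos hth]
      refine hqupInv _ rfl rfl rfl rfl rfl rfl rfl ?_
      rw [hcands, List.foldl_append, ← hfp]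
      rw [show cand signal n md thr (j+1) = [((j+1), promv signal n md (j+1))] by
        unfold cand; rw [if_pos hpk, if_pos hth]]
      rfl
    · rw [if_neg hth]
      refine hqupInv _ rfl rfl rfl rfl rfl rfl rfl ?_
      rw [hcands, List.foldl_append, ← hfp]
      rw [show cand signal n md thr (j+1) = [] by
        unfold cand; rw [if_pos hpk, if_neg hth]]
      rw [List.foldl_nil, hufp, hufpr]
  · rw [if_neg hpk]
    refine hqupInv _ rfl rfl rfl rfl rfl rfl rfl ?_
    rw [hcands, List.foldl_append, ← hfp]
    rw [show cand signal n md thr (j+1) = [] by unfold cand; rw [if_neg hpk]]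
    rw [List.foldl_nil, hufp, hufpr]

lemma binv (signal : List Int) (n md thr : Int) (hn : n = signal.length) (hmd : 1 ≤ md) :
    ∀ j : Nat, (j : Int) ≤ n - 2 →
      BInv signal n md thr j ((PySem.List.pyRange 1 ((j:Int)+1) 1).foldl
        (bstep signal n md thr) ⟨[], [], [], [], [], [], 0, 1, 1⟩) := by
  intro j
  induction j with
  | zero =>
    intro hj
    rw [PySem.List.pyRange_one_eq_nil (by omega)]
    show BInv signal n md thr 0 ⟨[], [], [], [], [], [], 0, 1, 1⟩
    refine ⟨trivial, trivial, trivial, trivial, by simp; omega, rfl, by simp, ?_, ?_, ?_⟩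
    · show qlist [] [] = win signal (max 0 (0 - md)).toNat (0:Int).toNat
      unfold qlist win; simp
    · show qlist [] [] = win signal ((0:Int)+1).toNat (1:Int).toNat
      unfold qlist win; simp
    · show (([], []) : List Int × List Int) = (cands signal n md thr (0+1)).foldl (fstep md) ([], [])
      unfold cands
      rw [PySem.List.pyRange_one_eq_nil (by omega)]
      rfl
  | succ k ih =>
    intro hj
    have h1 : ((k:Int)+1) ≤ n - 2 := by exact_mod_cast hj
    have h2 : (1:Int) ≤ (k:Int) + 1 := by omega
    rw [show ((k+1 : Nat) : Int) + 1 = ((k:Int) + 1) + 1 by push_cast; ring,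
        PySem.List.pyRange_one_succ_right (by omega), List.foldl_append, List.foldl_cons, List.foldl_nil]
    have := bstep_inv hn hmd (by positivity) (by omega) (ih (by omega))
    exact_mod_cast this

/- ---- assembly ---- -/

lemma bstep_fp_const (signal : List Int) (n md thr : Int) (l : List Int) :
    ∀ s : BSt,
      (∀ i ∈ l, ¬(PySem.List.pyGetD signal i 0 > PySem.List.pyGetD signal (i-1) 0 ∧
                  PySem.List.pyGetD signal i 0 > PySem.List.pyGetD signal (i+1) 0)) →
      (l.foldl (bstep signal n md thr) s).fp = s.fp ∧
      (l.foldl (bstep signal n md thr) s).fpr = s.fpr := by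
  induction l with
  | nil => intro s h; exact ⟨rfl, rfl⟩
  | cons x t ih =>
    intro s h
    rw [List.foldl_cons]
    have hb : (bstep signal n md thr s x).fp = s.fp ∧
        (bstep signal n md thr s x).fpr = s.fpr := by
      rw [bstep_eq, if_neg (h x (by simp))]
      exact ⟨rfl, rfl⟩
    have ht := ih (bstep signal n md thr s x) (fun i hi => h i (by simp [hi]))
    exact ⟨ht.1.trans hb.1, ht.2.trans hb.2⟩

lemma fstep_nil (md : Int) (c : Int × Int) : fstep md ([], []) c = ([c.1], [c.2]) := by
  unfold fstep
  rw [if_neg (by simp)]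
  simp

lemma foldl_astep0 (signal : List Int) (n md thr : Int) (l : List Int) :
    l.foldl (astep signal n md thr) ([], []) =
      ((l.flatMap (cand signal n md thr)).map Prod.fst,
       (l.flatMap (cand signal n md thr)).map Prod.snd) := by
  rw [foldl_astep]
  simp

-- ===== VERDICT (by name: the statement is the Claim_ definition above) =====
theorem find_peaks_with_prom_spec : Claim_equal_find_peaks_with_prom := by
  intro signal md thr _hdom hpre
  show find_peaks_with_prom signal md thr = find_peaks_with_prom_alt signal md thr
  simp only [find_peaks_with_prom, find_peaks_with_prom_alt]
  rcases hpre with hmd | hnp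
  · -- min_distance ≥ 1: the full queue invariant applies
    by_cases h3 : 3 ≤ (signal.length : Int)
    · have hb := binv signal (signal.length : Int) md thr rfl hmd
        ((signal.length : Int) - 2).toNat (by omega)
      have e : ((((signal.length : Int) - 2).toNat : Int)) + 1 = (signal.length : Int) - 1 := by
        omega
      rw [e] at hb
      rw [foldl_astep0]
      obtain ⟨-, -, -, -, -, -, -, -, -, hbfp⟩ := hb
      rw [e] at hbfp
      simp only [cands] at hbfp
      rw [hbfp]
      generalize ((PySem.List.pyRange 1 ((signal.length : Int) - 1) 1).flatMap
        (cand signal (signal.length : Int) md thr)) = CS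
      rcases CS with _ | ⟨c0, _ | ⟨c1, rest⟩⟩
      · simp
      · rw [List.foldl_cons, List.foldl_nil, fstep_nil]
        simp
      · rw [if_neg (by simp)]
        simp only [List.map_cons]
        show (((c1 :: rest).map Prod.fst).zip ((c1 :: rest).map Prod.snd)).foldl
            (astep2 md) ([c0.1], [c0.2]) = _
        rw [List.zip_map']
        simp only [Prod.mk.eta, List.map_id']
        rw [foldl_astep2_eq_fstep md _ _ (by simp) (by simp)]
        rw [show (c0 :: c1 :: rest).foldl (fstep md) ([], [])
            = (c1 :: rest).foldl (fstep md) ([c0.1], [c0.2]) by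
          rw [List.foldl_cons, fstep_nil]]
    · -- fewer than three samples: both loops are empty
      rw [PySem.List.pyRange_one_eq_nil (by omega)]
      simp
  · -- min_distance ≤ 0 is admitted only without local maxima: nothing is ever emitted
    have hcs : (PySem.List.pyRange 1 ((signal.length : Int) - 1) 1).flatMap
        (cand signal (signal.length : Int) md thr) = [] := by
      rw [List.flatMap_eq_nil_iff]
      intro i hi
      unfold cand
      rw [if_neg (hnp i hi)]
    have hfix := bstep_fp_const signal (signal.length : Int) md thr
      (PySem.List.pyRange 1 ((signal.length : Int) - 1) 1) ⟨[], [], [], [], [], [], 0, 1, 1⟩ hnp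
    rw [foldl_astep0, hcs, hfix.1, hfix.2]
    simp
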